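-- pv_equiv track=rewrite | github.com/jweingardt12/fbb-mcp | scripts/intel.py | _find_in_savant
-- ===== SOURCE A (Python) =====
-- def _normalize_name(name):
--     """Normalize player name for matching across sources"""
--     if not name:
--         return ""
--     name = name.strip().lower()
--     # Handle "Last, First" format from Savant
--     if "," in name:
--         parts = name.split(",", 1)
--         name = parts[1].strip() + " " + parts[0].strip()
--     # Remove Jr., Sr., III, etc.
--     for suffix in [" jr.", " sr.", " iii", " ii", " iv"]:
--         name = name.replace(suffix, "")
--     return name.strip()
--
-- def _find_in_savant(player_name, savant_data):
--     """Find a player in Baseball Savant data by name matching"""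
--     if not savant_data:
--         return None
--     norm = _normalize_name(player_name)
--     # Try direct match on normalized names
--     for key, row in savant_data.items():
--         if key.startswith("id:"):
--             continue
--         if _normalize_name(key) == norm:
--             return row
--         # Also try the player_name field if it exists
--         if _normalize_name(row.get("player_name", "")) == norm:
--             return row
--         if _normalize_name(row.get("last_name, first_name", "")) == norm:
--             return row
--     # Fuzzy: check if all parts of the search name appear
--     parts = norm.split()
--     if parts:
--         for key, row in savant_data.items():
--             if key.startswith("id:"):
--                 continue
--             row_norm = _normalize_name(key)
--             if all(p in row_norm for p in parts):
--                 return row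
--     return None
-- ===== SOURCE B (Python) =====
-- def _normalize_name(name):
--     """Normalize player name for matching across sources"""
--     if not name:
--         return ""
--     name = name.strip().lower()
--     if "," in name:
--         parts = name.split(",", 1)
--         name = parts[1].strip() + " " + parts[0].strip()
--     for suffix in [" jr.", " sr.", " iii", " ii", " iv"]:
--         name = name.replace(suffix, "")
--     return name.strip()
--
-- def _find_in_savant(player_name, savant_data):
--     """Find a player in Baseball Savant data by name matching (single pass).
--
--     One pass over the data: return immediately on an exact normalized-name
--     match; remember the FIRST fuzzy (all-words-contained) hit in an
--     accumulator and return it only if no exact match exists anywhere."""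
--     if not savant_data:
--         return None
--     norm = _normalize_name(player_name)
--     parts = norm.split()
--     fuzzy_hit = None
--     for key, row in savant_data.items():
--         if key.startswith("id:"):
--             continue
--         key_norm = _normalize_name(key)
--         if norm in (key_norm,
--                     _normalize_name(row.get("player_name", "")),
--                     _normalize_name(row.get("last_name, first_name", ""))):
--             return row
--         if fuzzy_hit is None and parts and all(p in key_norm for p in parts):
--             fuzzy_hit = row
--     return fuzzy_hit
-- ===== Notes on version B (the rewrite author's own statement) =====
-- stated objective: simpler
-- what changed: A's two staged scans (an exact-match pass over the whole dict, then a separate fuzzy substring pass) are fused into one single pass that returns immediately on an exact match and keeps the first fuzzy hit in an accumulator, returned only if no exact match exists; each key is normalized once instead of twice.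
import Mathlib
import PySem

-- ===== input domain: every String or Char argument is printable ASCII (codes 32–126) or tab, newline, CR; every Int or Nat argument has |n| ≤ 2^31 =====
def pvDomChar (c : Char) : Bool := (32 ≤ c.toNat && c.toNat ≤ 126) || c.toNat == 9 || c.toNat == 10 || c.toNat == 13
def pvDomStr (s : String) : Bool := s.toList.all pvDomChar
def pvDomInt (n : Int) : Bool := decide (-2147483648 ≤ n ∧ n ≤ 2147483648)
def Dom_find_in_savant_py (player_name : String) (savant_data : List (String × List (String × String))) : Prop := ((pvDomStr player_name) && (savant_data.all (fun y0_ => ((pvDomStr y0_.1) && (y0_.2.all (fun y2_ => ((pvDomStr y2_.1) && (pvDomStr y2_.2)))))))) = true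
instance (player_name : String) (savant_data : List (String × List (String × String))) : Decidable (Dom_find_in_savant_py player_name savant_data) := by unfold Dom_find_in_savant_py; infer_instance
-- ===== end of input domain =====

-- B fuses A's two staged scans (exact pass, then fuzzy pass) into a single pass with an
-- accumulator holding the first fuzzy hit; each key is normalized once. Objective: simpler.

-- ===== PORT A =====

-- shared helper: port of _normalize_name, working on List Char (exact on the ASCII domain)
def pvNorm (name : List Char) : List Char :=
  if name = [] then [] else
  let n1 := PySem.Chars.lower (PySem.Chars.strip name)
  let n2 :=
    if PySem.Chars.isIn [','] n1 then
      let parts := PySem.Chars.splitOnMax n1 [','] 1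
      PySem.Chars.strip (parts.getD 1 []) ++ [' '] ++ PySem.Chars.strip (parts.getD 0 [])
    else n1
  let n3 := [" jr.", " sr.", " iii", " ii", " iv"].foldl
      (fun s suffix => PySem.Chars.replace s suffix.toList []) n2
  PySem.Chars.strip n3

-- row.get("player_name", "") etc., with dict semantics on the row
def pvRowName (row : List (String × String)) (field : String) : List Char :=
  pvNorm ((PySem.Dict.ofList row).getD field "").toList

-- A's first loop: direct match on the three normalized candidate names, first row wins
def pvDirectA (norm : List Char) : List (String × List (String × String)) → Option (List (String × String))
  | [] => none
  | (key, row) :: rest =>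
    if PySem.Chars.startswith key.toList "id:".toList then pvDirectA norm rest
    else if pvNorm key.toList = norm then some row
    else if pvRowName row "player_name" = norm then some row
    else if pvRowName row "last_name, first_name" = norm then some row
    else pvDirectA norm rest

-- A's second loop: fuzzy fallback
def pvFuzzy (parts : List (List Char)) : List (String × List (String × String)) → Option (List (String × String))
  | [] => none
  | (key, row) :: rest =>
    if PySem.Chars.startswith key.toList "id:".toList then pvFuzzy parts rest
    else if parts.all (fun p => PySem.Chars.isIn p (pvNorm key.toList)) then some row
    else pvFuzzy parts rest

def find_in_savant_py (player_name : String) (savant_data : List (String × List (String × String))) : Option (List (String × String)) :=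
  if savant_data = [] then none else
  let items := (PySem.Dict.ofList savant_data).items
  let norm := pvNorm player_name.toList
  match pvDirectA norm items with
  | some row => some row
  | none =>
    let parts := PySem.Chars.split₀ norm
    if parts = [] then none else pvFuzzy parts items

-- ===== PORT B =====

-- B's single loop: early return on exact match, accumulator keeps the first fuzzy hit
def pvScanB (norm : List Char) (parts : List (List Char))
    (fuzzy : Option (List (String × String))) :
    List (String × List (String × String)) → Option (List (String × String))
  | [] => fuzzy
  | (key, row) :: rest =>
    if PySem.Chars.startswith key.toList "id:".toList then pvScanB norm parts fuzzy rest
    else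
      let keyNorm := pvNorm key.toList
      if keyNorm = norm ∨ pvRowName row "player_name" = norm ∨
          pvRowName row "last_name, first_name" = norm then some row
      else if fuzzy = none ∧ parts ≠ [] ∧
          parts.all (fun p => PySem.Chars.isIn p keyNorm) then
        pvScanB norm parts (some row) rest
      else pvScanB norm parts fuzzy rest

def find_in_savant_py_alt (player_name : String) (savant_data : List (String × List (String × String))) : Option (List (String × String)) :=
  if savant_data = [] then none else
  let items := (PySem.Dict.ofList savant_data).items
  let norm := pvNorm player_name.toList
  let parts := PySem.Chars.split₀ norm
  pvScanB norm parts none items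

-- ===== PRECONDITION & SPEC =====
def Spec_find_in_savant_py (player_name : String) (savant_data : List (String × List (String × String))) (out : Option (List (String × String))) : Prop := out = find_in_savant_py_alt player_name savant_data
instance (player_name : String) (savant_data : List (String × List (String × String))) (out : Option (List (String × String))) : Decidable (Spec_find_in_savant_py player_name savant_data out) := by unfold Spec_find_in_savant_py; infer_instance

-- ===== CLAIM (what is proved, stated in full; the proofs are below) =====
def Claim_equal_find_in_savant_py : Prop := ∀ (player_name : String) (savant_data : List (String × List (String × String))), Dom_find_in_savant_py player_name savant_data → Spec_find_in_savant_py player_name savant_data (find_in_savant_py player_name savant_data)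

-- ===== LEMMAS AND PROOFS =====

-- B's fused scan equals A's staged scans: exact match first, then the accumulator /
-- first fuzzy hit, where an empty parts list never records a fuzzy hit.
theorem pv_scan_eq_staged (norm : List Char) (parts : List (List Char))
    (fuzzy : Option (List (String × String)))
    (items : List (String × List (String × String))) :
    pvScanB norm parts fuzzy items =
      match pvDirectA norm items with
      | some row => some row
      | none =>
        match fuzzy with
        | some f => some f
        | none => if parts = [] then none else pvFuzzy parts items := by
  induction items generalizing fuzzy with
  | nil =>
    cases fuzzy with
    | some f => rfl
    | none =>
      simp only [pvScanB, pvDirectA, pvFuzzy]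
      by_cases hp : parts = [] <;> simp [hp]
  | cons kv rest ih =>
    obtain ⟨key, row⟩ := kv
    simp only [pvScanB, pvDirectA, pvFuzzy]
    by_cases hid : PySem.Chars.startswith key.toList "id:".toList = true
    · rw [if_pos hid, if_pos hid, if_pos hid]
      exact ih fuzzy
    · rw [if_neg hid, if_neg hid, if_neg hid]
      by_cases h1 : pvNorm key.toList = norm
      · rw [if_pos (Or.inl h1), if_pos h1]
      · rw [if_neg h1]
        by_cases h2 : pvRowName row "player_name" = norm
        · rw [if_pos (Or.inr (Or.inl h2)), if_pos h2]
        · rw [if_neg h2]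
          by_cases h3 : pvRowName row "last_name, first_name" = norm
          · rw [if_pos (Or.inr (Or.inr h3)), if_pos h3]
          · rw [if_neg (by simp [h1, h2, h3]), if_neg h3]
            by_cases hf : fuzzy = none ∧ parts ≠ [] ∧
                parts.all (fun p => PySem.Chars.isIn p (pvNorm key.toList)) = true
            · rw [if_pos hf, ih (some row)]
              obtain ⟨hfn, hpne, hall⟩ := hf
              subst hfn
              cases hd : pvDirectA norm rest with
              | some r => rfl
              | none => simp only [if_neg hpne, if_pos hall]
            · rw [if_neg hf, ih fuzzy]
              cases hd : pvDirectA norm rest with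
              | some r => rfl
              | none =>
                cases fuzzy with
                | some f => rfl
                | none =>
                  by_cases hp : parts = []
                  · simp [hp]
                  · have hall : ¬ parts.all
                        (fun p => PySem.Chars.isIn p (pvNorm key.toList)) = true := by
                      intro hall; exact hf ⟨rfl, hp, hall⟩
                    simp only [if_neg hp, if_neg hall]

-- ===== VERDICT (by name: the statement is the Claim_ definition above) =====
theorem find_in_savant_py_spec : Claim_equal_find_in_savant_py := by
  intro player_name savant_data _
  unfold Spec_find_in_savant_py find_in_savant_py find_in_savant_py_alt
  by_cases hs : savant_data = []
  · simp [hs]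
  · simp only [hs, if_false]
    rw [pv_scan_eq_staged]
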